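-- pv_equiv track=rewrite | github.com/wqvbka654-dotcom/dj | py/好看短剧.py | _get_last_vid_in_batch
-- ===== SOURCE A (Python) =====
-- def _get_last_vid_in_batch(batch):
--     if not batch:
--         return ""
--     last_vid = ""
--     for episode in batch:
--         vid = episode.get('content', {}).get('vid')
--         if vid:
--             last_vid = vid
--     return last_vid
-- ===== SOURCE B (Python) =====
-- def _get_last_vid_in_batch(batch):
--     if not batch:
--         return ""
--     for episode in reversed(list(batch)):
--         vid = episode.get('content', {}).get('vid')
--         if vid:
--             return vid
--     return ""
-- ===== Notes on version B (the rewrite author's own statement) =====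
-- stated objective: alternative
-- what changed: Replaces the forward pass with a last_vid accumulator by a reverse traversal that returns the first truthy vid immediately (no accumulator).
import Mathlib
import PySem

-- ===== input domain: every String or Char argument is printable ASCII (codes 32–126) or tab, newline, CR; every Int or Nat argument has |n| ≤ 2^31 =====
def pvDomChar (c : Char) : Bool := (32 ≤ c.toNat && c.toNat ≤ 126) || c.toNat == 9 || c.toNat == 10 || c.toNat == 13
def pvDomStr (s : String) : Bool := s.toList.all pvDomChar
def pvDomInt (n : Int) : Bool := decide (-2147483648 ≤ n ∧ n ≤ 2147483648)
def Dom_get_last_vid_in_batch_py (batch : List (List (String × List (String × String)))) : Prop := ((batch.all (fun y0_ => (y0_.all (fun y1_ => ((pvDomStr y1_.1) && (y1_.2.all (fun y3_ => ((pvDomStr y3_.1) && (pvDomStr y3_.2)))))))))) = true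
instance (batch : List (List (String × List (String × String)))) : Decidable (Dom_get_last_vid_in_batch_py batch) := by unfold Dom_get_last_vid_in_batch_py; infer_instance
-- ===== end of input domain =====

-- B replaces A's forward pass with a last_vid accumulator by a reverse traversal returning the first truthy vid (alternative decomposition, same cost).


-- ===== PORT A =====
def pvVid (ep : List (String × List (String × String))) : Option String :=
  PySem.Dict.get? (PySem.Dict.mk ((PySem.Dict.get? (PySem.Dict.mk ep) "content").getD [])) "vid"

def get_last_vid_in_batch_py (batch : List (List (String × List (String × String)))) : String :=
  if batch = [] then ""
  else
    batch.foldl (fun last_vid episode =>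
      match pvVid episode with
      | some v => if v ≠ "" then v else last_vid
      | none => last_vid) ""

-- ===== PORT B =====
def pvAltLoop (l : List (List (String × List (String × String)))) : String :=
  match l with
  | [] => ""
  | episode :: rest =>
    match pvVid episode with
    | some v => if v ≠ "" then v else pvAltLoop rest
    | none => pvAltLoop rest

def get_last_vid_in_batch_py_alt (batch : List (List (String × List (String × String)))) : String :=
  if batch = [] then "" else pvAltLoop batch.reverse

-- ===== PRECONDITION & SPEC =====
def Spec_get_last_vid_in_batch_py (batch : List (List (String × List (String × String)))) (out : String) : Prop := out = get_last_vid_in_batch_py_alt batch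
instance (batch : List (List (String × List (String × String)))) (out : String) : Decidable (Spec_get_last_vid_in_batch_py batch out) := by unfold Spec_get_last_vid_in_batch_py; infer_instance

-- ===== CLAIM (what is proved, stated in full; the proofs are below) =====
def Claim_equal_get_last_vid_in_batch_py : Prop := ∀ (batch : List (List (String × List (String × String)))), Dom_get_last_vid_in_batch_py batch → Spec_get_last_vid_in_batch_py batch (get_last_vid_in_batch_py batch)

-- ===== LEMMAS AND PROOFS =====

-- ===== VERDICT (by name: the statement is the Claim_ definition above) =====
def pvF : String → List (String × List (String × String)) → String := fun last_vid episode =>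
  match pvVid episode with
  | some v => if v ≠ "" then v else last_vid
  | none => last_vid

def pvLoopAux (l : List (List (String × List (String × String)))) (acc : String) : String :=
  match l with
  | [] => acc
  | episode :: rest =>
    match pvVid episode with
    | some v => if v ≠ "" then v else pvLoopAux rest acc
    | none => pvLoopAux rest acc

theorem pvLoopAux_append (xs : List (List (String × List (String × String))))
    (ep : List (String × List (String × String))) (acc : String) :
    pvLoopAux (xs ++ [ep]) acc = pvLoopAux xs (pvF acc ep) := by
  induction xs with
  | nil => simp [pvLoopAux, pvF]
  | cons x xs ih => simp [pvLoopAux, ih]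

theorem pvFoldl_eq (l : List (List (String × List (String × String)))) (acc : String) :
    l.foldl pvF acc = pvLoopAux l.reverse acc := by
  induction l generalizing acc with
  | nil => rfl
  | cons x xs ih =>
    simp only [List.foldl_cons, List.reverse_cons]
    rw [pvLoopAux_append, ih]

theorem pvLoopAux_empty (l : List (List (String × List (String × String)))) :
    pvLoopAux l "" = pvAltLoop l := by
  induction l with
  | nil => rfl
  | cons x xs ih => simp [pvLoopAux, pvAltLoop, ih]

theorem get_last_vid_in_batch_py_spec : Claim_equal_get_last_vid_in_batch_py := by
  intro batch _
  unfold Spec_get_last_vid_in_batch_py get_last_vid_in_batch_py get_last_vid_in_batch_py_alt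
  by_cases h : batch = []
  · simp [h]
  · simp only [h, if_false]
    rw [show (fun last_vid episode =>
      match pvVid episode with
      | some v => if v ≠ "" then v else last_vid
      | none => last_vid) = pvF from rfl, pvFoldl_eq, pvLoopAux_empty]
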